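-- pv_equiv track=rewrite | github.com/var77/pgconf-eu-demo | process_repo.py | is_acceptable_file
-- ===== SOURCE A (Python) =====
-- def is_acceptable_file(file_name):
--     ACCEPTABLE_SUFFIXES = [
--         '.py', '.js', '.java', '.rb', '.go', '.rs', '.json',
--         '.yaml', '.yml', '.xml', '.md', '.txt', '.sh', '.sql', '.ts'
--     ]
--     ACCEPTABLE_FILENAMES = {'Makefile', 'Dockerfile'}
--     return (
--         any(file_name.endswith(suffix) for suffix in ACCEPTABLE_SUFFIXES) or
--         file_name in ACCEPTABLE_FILENAMES
--     )
-- ===== SOURCE B (Python) =====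
-- _EXTS = frozenset({
--     'py', 'js', 'java', 'rb', 'go', 'rs', 'json',
--     'yaml', 'yml', 'xml', 'md', 'txt', 'sh', 'sql', 'ts'
-- })
-- _NAMES = frozenset({'Makefile', 'Dockerfile'})
--
--
-- def is_acceptable_file(file_name):
--     head, sep, tail = file_name.rpartition('.')
--     return (sep == '.' and tail in _EXTS) or file_name in _NAMES
-- ===== Notes on version B (the rewrite author's own statement) =====
-- stated objective: idiomatic
-- what changed: B replaces the 15-way endswith scan by a single rpartition split at the last dot and one frozenset membership test of the resulting extension (plus a frozenset of bare filenames).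
import Mathlib
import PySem

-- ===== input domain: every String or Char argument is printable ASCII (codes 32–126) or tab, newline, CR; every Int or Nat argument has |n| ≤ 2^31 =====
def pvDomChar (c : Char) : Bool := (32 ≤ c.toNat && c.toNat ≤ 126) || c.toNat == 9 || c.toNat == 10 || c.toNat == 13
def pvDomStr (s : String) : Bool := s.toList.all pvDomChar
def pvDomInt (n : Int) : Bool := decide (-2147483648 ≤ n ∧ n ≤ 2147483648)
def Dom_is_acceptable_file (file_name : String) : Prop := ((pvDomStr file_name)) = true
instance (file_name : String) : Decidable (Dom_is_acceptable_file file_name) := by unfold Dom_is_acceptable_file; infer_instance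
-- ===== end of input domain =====

-- B replaces A's 15-way endswith scan by one rpartition('.') split of the filename and a set lookup of the extension (idiomatic; same behaviour).

-- ===== PORT A =====
def pvSuffixes : List String :=
  [".py", ".js", ".java", ".rb", ".go", ".rs", ".json",
   ".yaml", ".yml", ".xml", ".md", ".txt", ".sh", ".sql", ".ts"]

def is_acceptable_file (file_name : String) : Bool :=
  pvSuffixes.any (fun suffix => PySem.Str.endswith file_name suffix)
    || (file_name == "Makefile" || file_name == "Dockerfile")

-- ===== PORT B =====
-- rpartition('.') has no PySem primitive; it is ported by hand, exactly: its tail is the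
-- (reversed) run of non-'.' chars at the end of the string, and sep == '.' iff the string
-- contains a '.' at all.
def pvNotDot (c : Char) : Bool := c != '.'

def pvExts : List (List Char) :=
  [['p','y'], ['j','s'], ['j','a','v','a'], ['r','b'], ['g','o'], ['r','s'],
   ['j','s','o','n'], ['y','a','m','l'], ['y','m','l'], ['x','m','l'],
   ['m','d'], ['t','x','t'], ['s','h'], ['s','q','l'], ['t','s']]

def is_acceptable_file_alt (file_name : String) : Bool :=
  let r := file_name.toList.reverse
  let tail := (r.takeWhile pvNotDot).reverse
  (r.contains '.' && pvExts.contains tail)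
    || (file_name == "Makefile" || file_name == "Dockerfile")

-- ===== PRECONDITION & SPEC =====
def Spec_is_acceptable_file (file_name : String) (out : Bool) : Prop := out = is_acceptable_file_alt file_name
instance (file_name : String) (out : Bool) : Decidable (Spec_is_acceptable_file file_name out) := by unfold Spec_is_acceptable_file; infer_instance

-- ===== CLAIM (what is proved, stated in full; the proofs are below) =====
def Claim_equal_is_acceptable_file : Prop := ∀ (file_name : String), Dom_is_acceptable_file file_name → Spec_is_acceptable_file file_name (is_acceptable_file file_name)

-- ===== LEMMAS AND PROOFS =====

-- (er ++ ['.']) is a prefix of r, for dot-free er, iff er is exactly the leading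
-- non-'.' run of r and r contains a '.'.
theorem pv_prefix_dot (er : List Char) :
    ∀ r : List Char, (∀ c ∈ er, c ≠ '.') →
      ((er ++ ['.']) <+: r ↔ (r.takeWhile pvNotDot = er ∧ '.' ∈ r)) := by
  induction er with
  | nil =>
    intro r _
    cases r with
    | nil => simp
    | cons c t =>
      by_cases hc : c = '.'
      · subst hc
        constructor
        · intro _
          exact ⟨by simp [pvNotDot], by simp⟩
        · intro _
          exact ⟨t, rfl⟩
      · constructor
        · rintro ⟨u, hu⟩
          simp at hu
          exact absurd hu.1.symm hc
        · rintro ⟨ht, _⟩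
          rw [List.takeWhile_cons] at ht
          simp [pvNotDot, hc] at ht
  | cons a er ih =>
    intro r h
    have ha : a ≠ '.' := h a (by simp)
    cases r with
    | nil => simp
    | cons c t =>
      constructor
      · intro hp
        obtain ⟨u, hu⟩ := hp
        simp only [List.cons_append, List.cons.injEq] at hu
        obtain ⟨hc, hu⟩ := hu
        subst hc
        have ht := (ih t (fun c hc => h c (List.mem_cons_of_mem _ hc))).mp ⟨u, hu⟩
        refine ⟨?_, List.mem_cons_of_mem _ ht.2⟩
        rw [List.takeWhile_cons]
        simp [pvNotDot, ha, ht.1]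
      · rintro ⟨ht, hm⟩
        rw [List.takeWhile_cons] at ht
        by_cases hc : c = '.'
        · simp [pvNotDot, hc] at ht
        · simp only [pvNotDot, bne_iff_ne, ne_eq, hc, not_false_eq_true,
            if_true, List.cons.injEq] at ht
          obtain ⟨hca, ht⟩ := ht
          subst hca
          have hm' : '.' ∈ t := by
            cases hm with
            | head => exact absurd rfl ha
            | tail _ h => exact h
          obtain ⟨u, hu⟩ := (ih t (fun c hc => h c (List.mem_cons_of_mem _ hc))).mpr ⟨ht, hm'⟩
          exact ⟨u, by simp [← hu]⟩

-- endswith '.'++e, for dot-free e, equals: "has a dot, and the run after the last dot is e".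
theorem pv_endswith_ext (s e : List Char) (he : ∀ c ∈ e, c ≠ '.') :
    PySem.Chars.endswith s ('.' :: e)
      = (s.reverse.contains '.' && ((s.reverse.takeWhile pvNotDot).reverse == e)) := by
  rw [Bool.eq_iff_iff, PySem.Chars.endswith_iff]
  rw [← List.reverse_prefix]
  simp only [List.reverse_cons]
  rw [pv_prefix_dot e.reverse s.reverse (by simpa using he)]
  constructor
  · rintro ⟨h1, h2⟩
    simp only [Bool.and_eq_true, beq_iff_eq, List.contains_eq_mem, decide_eq_true_eq]
    exact ⟨h2, by rw [h1, List.reverse_reverse]⟩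
  · intro hb
    simp only [Bool.and_eq_true, beq_iff_eq, List.contains_eq_mem, decide_eq_true_eq] at hb
    exact ⟨by rw [← hb.2, List.reverse_reverse], hb.1⟩

theorem pv_main : ∀ s : String, is_acceptable_file s = is_acceptable_file_alt s := by
  intro s
  unfold is_acceptable_file is_acceptable_file_alt pvSuffixes pvExts
  simp only [List.any_cons, List.any_nil, List.contains_cons, List.contains_nil,
    PySem.Str.endswith_eq]
  have h := fun (e : List Char) he => pv_endswith_ext s.toList e he
  rw [show (".py" : String).toList = '.' :: ['p','y'] from rfl,
      show (".js" : String).toList = '.' :: ['j','s'] from rfl,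
      show (".java" : String).toList = '.' :: ['j','a','v','a'] from rfl,
      show (".rb" : String).toList = '.' :: ['r','b'] from rfl,
      show (".go" : String).toList = '.' :: ['g','o'] from rfl,
      show (".rs" : String).toList = '.' :: ['r','s'] from rfl,
      show (".json" : String).toList = '.' :: ['j','s','o','n'] from rfl,
      show (".yaml" : String).toList = '.' :: ['y','a','m','l'] from rfl,
      show (".yml" : String).toList = '.' :: ['y','m','l'] from rfl,
      show (".xml" : String).toList = '.' :: ['x','m','l'] from rfl,
      show (".md" : String).toList = '.' :: ['m','d'] from rfl,
      show (".txt" : String).toList = '.' :: ['t','x','t'] from rfl,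
      show (".sh" : String).toList = '.' :: ['s','h'] from rfl,
      show (".sql" : String).toList = '.' :: ['s','q','l'] from rfl,
      show (".ts" : String).toList = '.' :: ['t','s'] from rfl]
  rw [h ['p','y'] (by simp), h ['j','s'] (by simp), h ['j','a','v','a'] (by simp),
      h ['r','b'] (by simp), h ['g','o'] (by simp), h ['r','s'] (by simp),
      h ['j','s','o','n'] (by simp), h ['y','a','m','l'] (by simp),
      h ['y','m','l'] (by simp), h ['x','m','l'] (by simp), h ['m','d'] (by simp),
      h ['t','x','t'] (by simp), h ['s','h'] (by simp), h ['s','q','l'] (by simp),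
      h ['t','s'] (by simp)]
  cases s.toList.reverse.contains '.' <;> simp

-- ===== VERDICT (by name: the statement is the Claim_ definition above) =====
theorem is_acceptable_file_spec : Claim_equal_is_acceptable_file := by
  intro s _
  unfold Spec_is_acceptable_file
  exact pv_main s
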